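-- pv_equiv track=rewrite | github.com/YulenkaW/Assignment-AI-agent | src/context_agent/codebase_indexer.py | _symbols_for_chunk
-- ===== SOURCE A (Python) =====
-- def _symbols_for_chunk(symbols: list[str], chunk_content: str) -> list[str]:
--     """Return only the symbols that appear in this specific chunk."""
--     chunk_symbols = []
--     for symbol_name in symbols:
--         if symbol_name in chunk_content:
--             chunk_symbols.append(symbol_name)
--         if len(chunk_symbols) >= 12:
--             break
--     return chunk_symbols
-- ===== SOURCE B (Python) =====
-- def _symbols_for_chunk(symbols: list[str], chunk_content: str) -> list[str]:
--     """Return only the symbols that appear in this specific chunk.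
--
--     Alternative algorithm: build, once per distinct symbol length L, the
--     set of all length-L substrings of the chunk, then answer each symbol
--     by a set lookup.
--     """
--     n = len(chunk_content)
--     grams = {}
--     for s in symbols:
--         L = len(s)
--         if L not in grams:
--             grams[L] = {chunk_content[i:i + L] for i in range(n - L + 1)}
--     return [s for s in symbols if s in grams[len(s)]][:12]
-- ===== Notes on version B (the rewrite author's own statement) =====
-- stated objective: alternative
-- what changed: Instead of testing each symbol with a substring scan of the chunk, B builds once per distinct symbol length L the set of all length-L substrings of the chunk, then answers each symbol by a single set lookup and takes the first 12 matches.
import Mathlib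
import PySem

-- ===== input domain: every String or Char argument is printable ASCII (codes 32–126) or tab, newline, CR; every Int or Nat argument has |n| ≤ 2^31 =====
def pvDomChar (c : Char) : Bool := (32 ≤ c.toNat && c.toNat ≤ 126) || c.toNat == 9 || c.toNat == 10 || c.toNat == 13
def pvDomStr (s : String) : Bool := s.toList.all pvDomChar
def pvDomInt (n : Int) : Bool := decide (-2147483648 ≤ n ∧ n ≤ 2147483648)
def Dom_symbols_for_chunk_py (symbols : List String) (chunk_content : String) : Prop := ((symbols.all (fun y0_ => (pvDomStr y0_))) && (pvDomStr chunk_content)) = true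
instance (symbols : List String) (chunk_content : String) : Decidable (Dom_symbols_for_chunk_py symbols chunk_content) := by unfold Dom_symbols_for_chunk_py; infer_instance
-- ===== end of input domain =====

-- B replaces A's per-symbol substring test by a different algorithm: the set of all
-- length-L substrings of the chunk is built once per distinct symbol length, then each
-- symbol is answered by one set lookup (objective: alternative).

-- ===== PORT A =====
-- the for-loop with its accumulator and break, as structural recursion over the symbols
def pvALoop (chunk_content : String) : List String → List String → List String
  | acc, [] => acc
  | acc, symbol_name :: rest =>
    let acc' := if PySem.Str.isIn symbol_name chunk_content then acc ++ [symbol_name] else acc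
    if 12 ≤ acc'.length then acc' else pvALoop chunk_content acc' rest

def symbols_for_chunk_py (symbols : List String) (chunk_content : String) : List String :=
  pvALoop chunk_content [] symbols

-- ===== PORT B =====
-- {chunk_content[i:i+L] for i in range(n - L + 1)}
def pvGramsFor (chunk_content : String) (L : Int) : PySem.Set String :=
  PySem.Set.ofList
    ((PySem.List.pyRange 0 (PySem.Str.len chunk_content - L + 1) 1).map
      (fun i => PySem.Str.slice chunk_content (some i) (some (i + L))))

-- the first loop of B: grams[L] built once per distinct length
def pvBuildGrams (chunk_content : String) (symbols : List String) :
    PySem.Dict Int (PySem.Set String) :=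
  symbols.foldl
    (fun grams s =>
      if grams.contains (PySem.Str.len s) then grams
      else grams.insert (PySem.Str.len s) (pvGramsFor chunk_content (PySem.Str.len s)))
    PySem.Dict.empty

def symbols_for_chunk_py_alt (symbols : List String) (chunk_content : String) : List String :=
  let grams := pvBuildGrams chunk_content symbols
  -- grams[len(s)]: the key is always present (inserted in the first loop), so getD with
  -- an empty-set default is exact; [...][:12] on a list is `take 12`
  (symbols.filter (fun s =>
      PySem.Set.contains (grams.getD (PySem.Str.len s) PySem.Set.empty) s)).take 12

-- ===== PRECONDITION & SPEC =====
def Spec_symbols_for_chunk_py (symbols : List String) (chunk_content : String) (out : List String) : Prop := out = symbols_for_chunk_py_alt symbols chunk_content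
instance (symbols : List String) (chunk_content : String) (out : List String) : Decidable (Spec_symbols_for_chunk_py symbols chunk_content out) := by unfold Spec_symbols_for_chunk_py; infer_instance

-- ===== CLAIM (what is proved, stated in full; the proofs are below) =====
def Claim_equal_symbols_for_chunk_py : Prop := ∀ (symbols : List String) (chunk_content : String), Dom_symbols_for_chunk_py symbols chunk_content → Spec_symbols_for_chunk_py symbols chunk_content (symbols_for_chunk_py symbols chunk_content)

-- ===== LEMMAS AND PROOFS =====

-- a list is an infix iff some in-bounds drop/take window equals it
lemma pv_infix_iff_window (l m : List Char) :
    l <:+: m ↔ ∃ j : Nat, j + l.length ≤ m.length ∧ (m.drop j).take l.length = l := by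
  constructor
  · rintro ⟨s, t, rfl⟩
    refine ⟨s.length, by simp, ?_⟩
    rw [List.append_assoc, List.drop_left, List.take_left]
  · rintro ⟨j, hj, hwin⟩
    have hpre : l <+: m.drop j := hwin ▸ List.take_prefix _ _
    exact hpre.isInfix.trans (List.drop_suffix j m).isInfix

-- the length-L substring set answers exactly Python's `s in chunk`
lemma pv_grams_contains (chunk_content s : String) :
    PySem.Set.contains (pvGramsFor chunk_content (PySem.Str.len s)) s
      = PySem.Str.isIn s chunk_content := by
  rcases hb : PySem.Str.isIn s chunk_content with _ | _
  · -- isIn = false : s is no infix, so no slice can equal it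
    rw [Bool.eq_false_iff]
    intro hc
    rw [PySem.Set.contains_iff] at hc
    unfold pvGramsFor at hc
    rw [PySem.Set.mem_ofList, List.mem_map] at hc
    obtain ⟨i, hi, hslice⟩ := hc
    rw [PySem.List.mem_pyRange_one] at hi
    obtain ⟨hi0, hiub⟩ := hi
    obtain ⟨j, rfl⟩ : ∃ j : Nat, i = (j : Int) := ⟨i.toNat, (Int.toNat_of_nonneg hi0).symm⟩
    have hIn : PySem.Str.isIn s chunk_content = true := by
      rw [PySem.Str.isIn_iff_infix, pv_infix_iff_window]
      refine ⟨j, ?_, ?_⟩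
      · simp only [PySem.Str.len_eq] at hiub; omega
      · have := congrArg String.toList hslice
        rw [PySem.Str.toList_slice, PySem.Chars.slice_eq_listSlice] at this
        have hL : (PySem.Str.len s) = ((s.toList.length : Nat) : Int) := by
          simp [PySem.Str.len_eq]
        rw [hL, PySem.List.slice_natCast_add] at this
        exact this
    rw [hb] at hIn; exact absurd hIn (by simp)
  · -- isIn = true : the matching window's slice is in the set
    rw [PySem.Str.isIn_iff_infix, pv_infix_iff_window] at hb
    obtain ⟨j, hj, hwin⟩ := hb
    rw [PySem.Set.contains_iff]
    unfold pvGramsFor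
    rw [PySem.Set.mem_ofList, List.mem_map]
    refine ⟨(j : Int), ?_, ?_⟩
    · rw [PySem.List.mem_pyRange_one]
      constructor
      · exact Int.natCast_nonneg j
      · simp only [PySem.Str.len_eq]; omega
    · apply String.toList_inj.mp
      rw [PySem.Str.toList_slice, PySem.Chars.slice_eq_listSlice]
      have hL : (PySem.Str.len s) = ((s.toList.length : Nat) : Int) := by
        simp [PySem.Str.len_eq]
      rw [hL, PySem.List.slice_natCast_add]
      exact hwin

-- contains is preserved by the rest of the building fold
lemma pv_build_contains_mono (chunk_content : String) (l : List String)
    (d : PySem.Dict Int (PySem.Set String)) (k : Int) (hk : d.contains k = true) :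
    (l.foldl
      (fun grams s =>
        if grams.contains (PySem.Str.len s) then grams
        else grams.insert (PySem.Str.len s) (pvGramsFor chunk_content (PySem.Str.len s)))
      d).contains k = true := by
  induction l generalizing d with
  | nil => exact hk
  | cons s rest ih =>
    simp only [List.foldl_cons]
    split
    · exact ih d hk
    · exact ih _ (by rw [PySem.Dict.contains_insert, hk, Bool.or_true])

-- the building fold: every stored value is the canonical gram set of its key,
-- and every processed symbol's length is a key
lemma pv_build_invariant (chunk_content : String) (l : List String)
    (d : PySem.Dict Int (PySem.Set String))
    (hd : ∀ L v, d.get? L = some v → v = pvGramsFor chunk_content L) :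
    (∀ L v, (l.foldl
        (fun grams s =>
          if grams.contains (PySem.Str.len s) then grams
          else grams.insert (PySem.Str.len s) (pvGramsFor chunk_content (PySem.Str.len s)))
        d).get? L = some v → v = pvGramsFor chunk_content L)
    ∧ (∀ s ∈ l, (l.foldl
        (fun grams s =>
          if grams.contains (PySem.Str.len s) then grams
          else grams.insert (PySem.Str.len s) (pvGramsFor chunk_content (PySem.Str.len s)))
        d).contains (PySem.Str.len s) = true) := by
  induction l generalizing d with
  | nil => exact ⟨hd, by simp⟩
  | cons s rest ih =>
    simp only [List.foldl_cons]
    by_cases hc : d.contains (PySem.Str.len s) = true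
    · rw [if_pos hc]
      obtain ⟨h1, h2⟩ := ih d hd
      refine ⟨h1, ?_⟩
      intro t ht
      rcases List.mem_cons.mp ht with rfl | ht'
      · exact pv_build_contains_mono chunk_content rest d _ hc
      · exact h2 t ht'
    · rw [if_neg hc]
      have hd' : ∀ L v,
          (d.insert (PySem.Str.len s) (pvGramsFor chunk_content (PySem.Str.len s))).get? L
            = some v → v = pvGramsFor chunk_content L := by
        intro L v hv
        rw [PySem.Dict.get?_insert] at hv
        split at hv
        · rename_i hEq; injection hv with hv; rw [hEq, ← hv]
        · exact hd L v hv
      obtain ⟨h1, h2⟩ := ih _ hd'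
      refine ⟨h1, ?_⟩
      intro t ht
      rcases List.mem_cons.mp ht with rfl | ht'
      · exact pv_build_contains_mono chunk_content rest _ _
          (PySem.Dict.contains_insert_self _ _ _)
      · exact h2 t ht'

-- for every symbol of the list, B's set lookup equals Python's `s in chunk`
lemma pv_lookup_eq_isIn (symbols : List String) (chunk_content : String)
    (s : String) (hs : s ∈ symbols) :
    PySem.Set.contains
        ((pvBuildGrams chunk_content symbols).getD (PySem.Str.len s) PySem.Set.empty) s
      = PySem.Str.isIn s chunk_content := by
  obtain ⟨h1, h2⟩ := pv_build_invariant chunk_content symbols PySem.Dict.empty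
    (by intro L v hv; simp [PySem.Dict.get?_empty] at hv)
  have hcon := h2 s hs
  rw [PySem.Dict.contains_eq_isSome_get?] at hcon
  obtain ⟨v, hv⟩ := Option.isSome_iff_exists.mp hcon
  have hveq := h1 _ _ hv
  unfold pvBuildGrams
  rw [PySem.Dict.getD_eq_get?_getD, hv]
  simp only [Option.getD_some]
  rw [hveq, pv_grams_contains]

-- A's loop with its break is filter-then-take of the remaining budget
lemma pv_aloop_eq_filter_take (chunk_content : String) (l : List String)
    (acc : List String) (hacc : acc.length ≤ 11) :
    pvALoop chunk_content acc l
      = acc ++ (l.filter (fun s => PySem.Str.isIn s chunk_content)).take (12 - acc.length) := by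
  induction l generalizing acc with
  | nil => simp [pvALoop]
  | cons s rest ih =>
    simp only [pvALoop]
    rcases hb : PySem.Str.isIn s chunk_content with _ | _
    · simp only [Bool.false_eq_true, if_false]
      rw [if_neg (by omega), ih acc hacc, List.filter_cons, hb]
      simp
    · simp only [if_true]
      rw [List.filter_cons, hb, if_pos rfl]
      by_cases h12 : 12 ≤ (acc ++ [s]).length
      · rw [if_pos h12]
        have hlen : acc.length = 11 := by simp at h12; omega
        simp [hlen]
      · rw [if_neg h12, ih (acc ++ [s]) (by simp at h12 ⊢; omega)]
        rw [List.take_cons (by omega)]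
        simp only [List.append_assoc, List.singleton_append, List.length_append,
          List.length_cons, List.length_nil]
        congr 3

-- ===== VERDICT (by name: the statement is the Claim_ definition above) =====
theorem symbols_for_chunk_py_spec : Claim_equal_symbols_for_chunk_py := by
  intro symbols chunk_content _
  unfold Spec_symbols_for_chunk_py symbols_for_chunk_py symbols_for_chunk_py_alt
  rw [pv_aloop_eq_filter_take chunk_content symbols [] (by simp)]
  simp only [List.length_nil, Nat.sub_zero, List.nil_append]
  congr 1
  exact (List.filter_congr (fun s hs => pv_lookup_eq_isIn symbols chunk_content s hs)).symm
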